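-- pv_equiv track=rewrite | github.com/gopallanda/DSA | spikeWell_stringQs.py | checkQs
-- ===== SOURCE A (Python) =====
-- def checkQs(strs):
--     stack = []
--     flag = 0
--
--     for char in strs:
--         if char == "?" and flag == 0:
--             continue
--
--         if char.isdigit():
--             if flag == 0:
--                 flag = 1
--                 stack = []  # reset for new digit
--             else:
--                 if len(stack) >= 3:
--                     return True  # valid case found
--                 else:
--                     stack = []  # reset for next digit
--
--         if char == "?" and flag == 1:
--             stack.append(char)
--
--     return False
-- ===== SOURCE B (Python) =====
-- def checkQs(strs):
--     digit_positions = [i for i, c in enumerate(strs) if c.isdigit()]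
--     return any(strs[a + 1:b].count("?") >= 3
--                for a, b in zip(digit_positions, digit_positions[1:]))
-- ===== Notes on version B (the rewrite author's own statement) =====
-- stated objective: alternative
-- what changed: Replaces A's stateful flag/stack scan with an index-based decomposition: collect all digit positions, then test each adjacent pair for >=3 '?' in the slice between them.
import Mathlib
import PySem

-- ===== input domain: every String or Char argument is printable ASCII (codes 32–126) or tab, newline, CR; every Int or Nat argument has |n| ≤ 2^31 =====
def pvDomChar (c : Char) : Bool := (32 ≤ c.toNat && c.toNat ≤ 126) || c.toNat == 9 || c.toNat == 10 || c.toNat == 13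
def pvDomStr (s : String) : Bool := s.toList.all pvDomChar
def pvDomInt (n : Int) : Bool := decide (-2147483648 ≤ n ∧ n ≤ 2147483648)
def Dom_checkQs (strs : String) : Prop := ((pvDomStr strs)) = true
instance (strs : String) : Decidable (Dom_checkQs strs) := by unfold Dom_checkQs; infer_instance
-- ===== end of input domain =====

-- B replaces A's stateful flag/stack scan by a different decomposition: collect the
-- digit positions, then test each adjacent pair for ≥ 3 '?' in the slice between them
-- (alternative algorithm, same cost).

-- ===== PORT A =====
-- literal transliteration of A's for-loop with early return; loop state = (stack, flag)
def checkQsGo : List Char → List Char → Int → Bool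
  | [], _, _ => false
  | c :: cs, stack, flag =>
    if c == '?' && flag == 0 then
      checkQsGo cs stack flag
    else if PySem.Chars.isdigit c then
      (if flag == 0 then
        checkQsGo cs [] 1
      else if stack.length ≥ 3 then
        true
      else
        checkQsGo cs [] flag)
    else if c == '?' && flag == 1 then
      checkQsGo cs (stack ++ [c]) flag
    else
      checkQsGo cs stack flag

def checkQs (strs : String) : Bool := checkQsGo strs.toList [] 0

-- ===== PORT B =====
-- B over the code points of strs (exact on the ASCII domain): enumerate, filter digits,
-- zip adjacent pairs, count '?' in the slice between each pair
def checkQs_alt (strs : String) : Bool :=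
  let l := strs.toList
  let dp := ((PySem.List.enumerate l 0).filter (fun p => PySem.Chars.isdigit p.2)).map (·.1)
  (dp.zip dp.tail).any (fun p =>
    decide (3 ≤ (PySem.List.slice l (some (p.1 + 1)) (some p.2)).count '?'))


-- ===== PRECONDITION & SPEC =====
def Spec_checkQs (strs : String) (out : Bool) : Prop := out = checkQs_alt strs
instance (strs : String) (out : Bool) : Decidable (Spec_checkQs strs out) := by unfold Spec_checkQs; infer_instance

-- ===== CLAIM (what is proved, stated in full; the proofs are below) =====
def Claim_equal_checkQs : Prop := ∀ (strs : String), Dom_checkQs strs → Spec_checkQs strs (checkQs strs)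

-- ===== LEMMAS AND PROOFS =====

-- gap machine: go1 cs k emits, at each digit of cs, the number of '?' seen since the last digit
def go1 : List Char → Nat → List Nat
  | [], _ => []
  | c :: cs, k =>
    if PySem.Chars.isdigit c then k :: go1 cs 0
    else if c = '?' then go1 cs (k + 1)
    else go1 cs k

def go0 : List Char → List Nat
  | [] => []
  | c :: cs => if PySem.Chars.isdigit c then go1 cs 0 else go0 cs

def dpN : List Char → List Nat
  | [] => []
  | c :: cs => if PySem.Chars.isdigit c then 0 :: (dpN cs).map (· + 1) else (dpN cs).map (· + 1)

def mc (l : List Char) : List Nat :=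
  ((dpN l).zip (dpN l).tail).map (fun p => ((l.drop (p.1 + 1)).take (p.2 - (p.1 + 1))).count '?')


theorem dpL_eq (l : List Char) :
    ∀ s : Nat, (((PySem.List.enumerate l (s : Int)).filter (fun p => PySem.Chars.isdigit p.2)).map (·.1))
      = (dpN l).map (fun n => ((s + n : Nat) : Int)) := by
  induction l with
  | nil => intro s; simp [PySem.List.enumerate_nil, dpN]
  | cons c cs ih =>
    intro s
    rw [PySem.List.enumerate_cons]
    have h1 : ((s : Int) + 1) = ((s + 1 : Nat) : Int) := by push_cast; ring
    rw [h1]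
    by_cases hd : PySem.Chars.isdigit c
    · simp only [List.filter_cons, hd, dpN, if_pos hd, if_pos trivial, List.map_cons, List.map_map]
      rw [ih (s + 1)]
      refine congrArg₂ _ (by push_cast; ring) ?_
      apply List.map_congr_left; intro n _; simp only [Function.comp_apply]; push_cast; ring
    · simp only [List.filter_cons, hd, dpN, if_neg hd, Bool.false_eq_true, if_false, List.map_map]
      rw [ih (s + 1)]
      apply List.map_congr_left; intro n _; simp only [Function.comp_apply]; push_cast; ring

theorem shift_counts (c : Char) (cs : List Char) (ps : List (Nat × Nat)) :
    ps.map (fun p => (((c :: cs).drop ((p.1 + 1) + 1)).take ((p.2 + 1) - ((p.1 + 1) + 1))).count '?')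
      = ps.map (fun p => ((cs.drop (p.1 + 1)).take (p.2 - (p.1 + 1))).count '?') := by
  apply List.map_congr_left
  intro p _
  have h2 : (p.2 + 1) - ((p.1 + 1) + 1) = p.2 - (p.1 + 1) := by omega
  rw [List.drop_succ_cons, h2]

theorem mc_cons_not_digit (c : Char) (cs : List Char) (h : ¬ PySem.Chars.isdigit c) :
    mc (c :: cs) = mc cs := by
  unfold mc
  rw [show dpN (c :: cs) = (dpN cs).map (· + 1) from by simp [dpN, h]]
  rw [← List.map_tail, List.zip_map, List.map_map]
  have := shift_counts c cs ((dpN cs).zip (dpN cs).tail)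
  simpa [Function.comp, Prod.map] using this

theorem mc_cons_digit (c : Char) (cs : List Char) (h : PySem.Chars.isdigit c) :
    mc (c :: cs) = (match dpN cs with
      | [] => []
      | j :: _ => ((cs.take j).count '?') :: mc cs) := by
  unfold mc
  rw [show dpN (c :: cs) = 0 :: (dpN cs).map (· + 1) from by simp [dpN, h]]
  cases hdp : dpN cs with
  | nil => simp
  | cons j rest =>
    simp only [List.map_cons, List.tail_cons, List.zip_cons_cons, List.map_cons]
    refine congrArg₂ _ ?_ ?_
    · show (((c :: cs).drop (0 + 1)).take ((j + 1) - (0 + 1))).count '?' = (cs.take j).count '?'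
      simp
    · have hz : (((j :: rest).map (· + 1)).zip (rest.map (· + 1)))
          = ((j :: rest).zip rest).map (Prod.map (· + 1) (· + 1)) := List.zip_map ..
      simp only [List.map_cons] at hz
      rw [hz, List.map_map]
      have hs := shift_counts c cs ((j :: rest).zip rest)
      simpa [Function.comp, Prod.map] using hs

theorem mc_main (cs : List Char) : ∀ k : Nat,
    (match dpN cs with
      | [] => []
      | j :: _ => (k + (cs.take j).count '?') :: mc cs) = go1 cs k := by
  induction cs with
  | nil => intro k; simp [dpN, go1]
  | cons c cs ih =>
    intro k
    by_cases hd : PySem.Chars.isdigit c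
    · rw [show dpN (c :: cs) = 0 :: (dpN cs).map (· + 1) from by simp [dpN, hd]]
      simp only [List.take_zero, List.count_nil, Nat.add_zero]
      rw [mc_cons_digit c cs hd]
      have h0 := ih 0
      simp only [Nat.zero_add] at h0
      rw [h0, go1, if_pos hd]
    · rw [show dpN (c :: cs) = (dpN cs).map (· + 1) from by simp [dpN, hd]]
      rw [go1, if_neg hd]
      by_cases hq : c = '?'
      · rw [if_pos hq, ← ih (k + 1)]
        cases hdp : dpN cs with
        | nil => simp
        | cons j rest =>
          simp only [List.map_cons]
          rw [mc_cons_not_digit c cs hd]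
          have hc : ((c :: cs).take (j + 1)).count '?' = 1 + (cs.take j).count '?' := by
            simp [List.take_succ_cons, List.count_cons, hq, Nat.add_comm]
          rw [hc]
          refine congrArg₂ _ (by omega) rfl
      · rw [if_neg hq, ← ih k]
        cases hdp : dpN cs with
        | nil => simp
        | cons j rest =>
          simp only [List.map_cons]
          rw [mc_cons_not_digit c cs hd]
          have hc : ((c :: cs).take (j + 1)).count '?' = (cs.take j).count '?' := by
            simp [List.take_succ_cons, List.count_cons, hq]
          rw [hc]

theorem mc_eq_go0 (l : List Char) : mc l = go0 l := by
  induction l with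
  | nil => rfl
  | cons c cs ih =>
    by_cases hd : PySem.Chars.isdigit c
    · rw [mc_cons_digit c cs hd]
      have h0 := mc_main cs 0
      simp only [Nat.zero_add] at h0
      rw [h0, go0, if_pos hd]
    · rw [mc_cons_not_digit c cs hd, ih, go0, if_neg hd]


theorem alt_eq_mc (strs : String) :
    checkQs_alt strs = (mc strs.toList).any (fun k => decide (3 ≤ k)) := by
  unfold checkQs_alt mc
  simp only []
  have h := dpL_eq strs.toList 0
  simp only [Nat.cast_zero, Nat.zero_add] at h
  rw [h]
  rw [← List.map_tail, List.zip_map, List.any_map, List.any_map]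
  apply PySem.List.any_congr_mem
  intro p _
  simp only [Function.comp_apply, Prod.map_fst, Prod.map_snd]
  have hc : ((p.1 : Int) + 1) = ((p.1 + 1 : Nat) : Int) := by push_cast; ring
  simp only [hc, PySem.List.slice_natCast]

theorem goA_eq (cs : List Char) :
    (∀ st : List Char, checkQsGo cs st 0 = (go0 cs).any (fun k => decide (3 ≤ k))) ∧
    (∀ st : List Char, checkQsGo cs st 1 = (go1 cs st.length).any (fun k => decide (3 ≤ k))) := by
  induction cs with
  | nil => exact ⟨fun _ => rfl, fun _ => rfl⟩
  | cons c cs ih =>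
    obtain ⟨ih0, ih1⟩ := ih
    constructor
    · intro st
      rw [checkQsGo, go0]
      by_cases hq : c = '?'
      · subst hq
        have hd : ¬ PySem.Chars.isdigit '?' := by decide
        simp only [hd]
        simpa using ih0 st
      · by_cases hd : PySem.Chars.isdigit c
        · simp [hq, hd, ih1 []]
        · simp [hq, hd, ih0 st]
    · intro st
      rw [checkQsGo, go1]
      by_cases hq : c = '?'
      · subst hq
        have hd : ¬ PySem.Chars.isdigit '?' := by decide
        simp [hd, ih1 (st ++ ['?'])]
      · by_cases hd : PySem.Chars.isdigit c
        · by_cases h3 : st.length ≥ 3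
          · simp [hq, hd, h3]
          · simp [hq, hd, h3, ih1 []]
        · simp [hq, hd, ih1 st]


-- ===== VERDICT (by name: the statement is the Claim_ definition above) =====
theorem checkQs_spec : Claim_equal_checkQs := by
  intro strs _
  unfold Spec_checkQs checkQs
  rw [alt_eq_mc, mc_eq_go0]
  exact (goA_eq strs.toList).1 []
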